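-- pv_equiv track=rewrite | github.com/kripsaar/AdventOfCode | 2023/03-12/part_one.py | check_neighborhood
-- ===== SOURCE A (Python) =====
-- offsets = [(-1, -1), (0, -1), (1, -1), (-1, 0), (1, 0), (-1, 1), (0, 1), (1, 1)]
--
-- def check_neighborhood(num_with_coords, symbol_coords) -> bool:
--     num, coords = num_with_coords
--     for coord in coords:
--         for x_offset, y_offset in offsets:
--             x = coord[0] + x_offset
--             y = coord[1] + y_offset
--             if (x, y) in symbol_coords:
--                 return True
--     return False
-- ===== SOURCE B (Python) =====
-- def check_neighborhood(num_with_coords, symbol_coords) -> bool: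
--     # A symbol is adjacent to a cell iff their Chebyshev distance is 1,
--     # i.e. |dx| <= 1 and |dy| <= 1 and the points differ. No offsets table.
--     num, coords = num_with_coords
--     return any(abs(sx - cx) <= 1 and abs(sy - cy) <= 1 and (sx, sy) != (cx, cy)
--                for (sx, sy) in symbol_coords for (cx, cy) in coords)
-- ===== Notes on version B (the rewrite author's own statement) =====
-- stated objective: alternative
-- what changed: B eliminates the 8-offset table and neighbor generation entirely: it scans symbol coordinates in the outer loop and decides adjacency per pair by a Chebyshev-distance arithmetic test (|dx|<=1 and |dy|<=1 and points differ), instead of A's per-cell enumeration of offset neighbors with a membership scan.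
import Mathlib
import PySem

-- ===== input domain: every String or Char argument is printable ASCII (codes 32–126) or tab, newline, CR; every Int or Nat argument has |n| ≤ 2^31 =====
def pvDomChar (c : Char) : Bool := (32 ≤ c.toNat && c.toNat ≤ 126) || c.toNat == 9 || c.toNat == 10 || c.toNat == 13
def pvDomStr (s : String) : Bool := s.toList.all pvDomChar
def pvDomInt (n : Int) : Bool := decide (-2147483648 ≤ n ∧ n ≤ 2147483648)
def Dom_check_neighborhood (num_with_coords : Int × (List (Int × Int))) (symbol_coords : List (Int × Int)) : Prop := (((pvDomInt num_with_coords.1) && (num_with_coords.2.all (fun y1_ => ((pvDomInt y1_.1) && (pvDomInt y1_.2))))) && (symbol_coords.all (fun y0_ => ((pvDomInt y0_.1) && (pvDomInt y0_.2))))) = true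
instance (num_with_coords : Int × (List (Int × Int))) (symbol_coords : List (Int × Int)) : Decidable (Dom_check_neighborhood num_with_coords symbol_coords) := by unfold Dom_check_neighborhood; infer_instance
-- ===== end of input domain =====

-- B replaces A's 8-offset neighbor enumeration by a per-pair Chebyshev-distance test over symbols (alternative decomposition).


-- ===== PORT A =====
-- module-level constant 'offsets'
def pvOffsets : List (Int × Int) :=
  [(-1, -1), (0, -1), (1, -1), (-1, 0), (1, 0), (-1, 1), (0, 1), (1, 1)]

-- A's nested loops with early return = any over coords, any over offsets, membership scan of symbol_coords
def check_neighborhood (num_with_coords : Int × (List (Int × Int))) (symbol_coords : List (Int × Int)) : Bool :=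
  let coords := num_with_coords.2
  coords.any (fun coord =>
    pvOffsets.any (fun off =>
      let x := coord.1 + off.1
      let y := coord.2 + off.2
      symbol_coords.contains (x, y)))

-- ===== PORT B =====
-- B: any over symbols (outer) × coords (inner), adjacency decided arithmetically: |dx| ≤ 1 ∧ |dy| ≤ 1 ∧ points differ
def check_neighborhood_alt (num_with_coords : Int × (List (Int × Int))) (symbol_coords : List (Int × Int)) : Bool :=
  let coords := num_with_coords.2
  symbol_coords.any (fun s =>
    coords.any (fun c =>
      decide (|s.1 - c.1| ≤ 1) && decide (|s.2 - c.2| ≤ 1) && !(decide (s = c))))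

-- ===== PRECONDITION & SPEC =====
def Spec_check_neighborhood (num_with_coords : Int × (List (Int × Int))) (symbol_coords : List (Int × Int)) (out : Bool) : Prop := out = check_neighborhood_alt num_with_coords symbol_coords
instance (num_with_coords : Int × (List (Int × Int))) (symbol_coords : List (Int × Int)) (out : Bool) : Decidable (Spec_check_neighborhood num_with_coords symbol_coords out) := by unfold Spec_check_neighborhood; infer_instance

-- ===== CLAIM =====
def Claim_equal_check_neighborhood : Prop := ∀ (num_with_coords : Int × (List (Int × Int))) (symbol_coords : List (Int × Int)), Dom_check_neighborhood num_with_coords symbol_coords → Spec_check_neighborhood num_with_coords symbol_coords (check_neighborhood num_with_coords symbol_coords)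

-- ===== LEMMAS AND PROOFS =====

-- The offsets list is exactly the Chebyshev neighborhood of radius 1 minus the origin.
theorem mem_pvOffsets_iff (d : Int × Int) :
    d ∈ pvOffsets ↔ |d.1| ≤ 1 ∧ |d.2| ≤ 1 ∧ d ≠ (0, 0) := by
  obtain ⟨dx, dy⟩ := d
  simp only [pvOffsets, List.mem_cons, List.not_mem_nil, or_false, Prod.mk.injEq, ne_eq,
    not_and, abs_le]
  omega

-- A as a proposition: some coord plus some offset lands on a symbol.
theorem check_neighborhood_iff (nwc : Int × (List (Int × Int))) (sc : List (Int × Int)) :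
    check_neighborhood nwc sc = true ↔
      ∃ c ∈ nwc.2, ∃ o ∈ pvOffsets, (c.1 + o.1, c.2 + o.2) ∈ sc := by
  simp [check_neighborhood]

-- B as a proposition: some symbol is Chebyshev-adjacent to some coord.
theorem check_neighborhood_alt_iff (nwc : Int × (List (Int × Int))) (sc : List (Int × Int)) :
    check_neighborhood_alt nwc sc = true ↔
      ∃ s ∈ sc, ∃ c ∈ nwc.2, |s.1 - c.1| ≤ 1 ∧ |s.2 - c.2| ≤ 1 ∧ s ≠ c := by
  simp [check_neighborhood_alt, and_assoc]

-- ===== VERDICT =====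
theorem check_neighborhood_spec : Claim_equal_check_neighborhood := by
  intro nwc sc _
  unfold Spec_check_neighborhood
  rw [Bool.eq_iff_iff, check_neighborhood_iff, check_neighborhood_alt_iff]
  constructor
  · rintro ⟨c, hc, o, ho, hs⟩
    refine ⟨(c.1 + o.1, c.2 + o.2), hs, c, hc, ?_⟩
    rw [mem_pvOffsets_iff] at ho
    obtain ⟨h1, h2, h3⟩ := ho
    refine ⟨by simpa using h1, by simpa using h2, ?_⟩
    intro h
    apply h3
    obtain ⟨ox, oy⟩ := o
    obtain ⟨cx, cy⟩ := c
    simp only [Prod.mk.injEq] at h ⊢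
    omega
  · rintro ⟨s, hs, c, hc, h1, h2, h3⟩
    refine ⟨c, hc, (s.1 - c.1, s.2 - c.2), ?_, ?_⟩
    · rw [mem_pvOffsets_iff]
      refine ⟨h1, h2, ?_⟩
      intro h
      apply h3
      obtain ⟨sx, sy⟩ := s
      obtain ⟨cx, cy⟩ := c
      simp only [Prod.mk.injEq] at h ⊢
      omega
    · simpa using hs
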